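-- pv_equiv track=rewrite | github.com/pypi-data/pypi-mirror-354 | packages/js-liner/js-liner-0.1.0.tar.gz/js-liner-0.1.0/js_liner/__init__.py | rm_closed_newline
-- ===== SOURCE A (Python) =====
-- def rm_closed_newline(joined_code):
-- 	s_ls = list(joined_code)	# 1文字ずつに区切る
-- 	depth = 0
-- 	ret_ls = []
-- 	for s in s_ls:
-- 		if s == "\n" and depth > 0: s = ""
-- 		ret_ls.append(s)
-- 		if s == "(": depth += 1
-- 		if s == ")": depth -= 1
-- 	return "".join(ret_ls)
-- ===== SOURCE B (Python) =====
-- def rm_closed_newline(joined_code):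
--     segs = joined_code.split("\n")
--     parts = [segs[0]]
--     bal = segs[0].count("(") - segs[0].count(")")
--     for seg in segs[1:]:
--         if bal <= 0:
--             parts.append("\n")
--         parts.append(seg)
--         bal += seg.count("(") - seg.count(")")
--     return "".join(parts)
-- ===== Notes on version B (the rewrite author's own statement) =====
-- stated objective: faster
-- what changed: B splits the code into line segments and walks them once, deciding each boundary from a running per-segment paren-count balance, instead of A's character-by-character loop with a depth counter; the per-character Python work disappears into C-level split/count calls.
import Mathlib
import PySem

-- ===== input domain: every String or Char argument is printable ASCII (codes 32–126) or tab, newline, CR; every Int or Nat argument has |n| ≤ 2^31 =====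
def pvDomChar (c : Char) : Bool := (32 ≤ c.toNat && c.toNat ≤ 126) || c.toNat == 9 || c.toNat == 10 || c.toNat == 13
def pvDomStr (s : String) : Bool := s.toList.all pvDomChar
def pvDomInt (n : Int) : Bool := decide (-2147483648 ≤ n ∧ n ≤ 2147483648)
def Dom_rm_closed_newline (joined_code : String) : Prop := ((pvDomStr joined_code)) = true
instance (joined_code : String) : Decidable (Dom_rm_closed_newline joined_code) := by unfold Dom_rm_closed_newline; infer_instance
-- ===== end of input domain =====

-- B removes newlines inside parentheses line-by-line with per-segment paren counts instead of
-- character-by-character; line-wise decomposition, measurably faster by a constant factor (C-level split/count instead of a per-character Python loop).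

-- ===== PORT A =====
-- A: char-by-char loop, depth counter, drop '\n' when depth > 0.
def rm_closed_newline (joined_code : String) : String :=
  let s_ls := joined_code.toList
  let res := s_ls.foldl (fun (st : Int × List (List Char)) c =>
      let s : List Char := if c = '\n' ∧ st.1 > 0 then [] else [c]
      let ret_ls := st.2 ++ [s]
      let d1 := if s = ['('] then st.1 + 1 else st.1
      let d2 := if s = [')'] then d1 - 1 else d1
      (d2, ret_ls)) (0, [])
  String.mk res.2.flatten

-- ===== PORT B =====
-- hand-written port of Python's str.split("\n") (exact: "" ↦ [""], trailing "\n" keeps an empty last piece)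
def pvSplitNL : List Char → List (List Char)
  | [] => [[]]
  | c :: t =>
    match pvSplitNL t with
    | [] => [[]]
    | s :: rest => if c = '\n' then [] :: s :: rest else (c :: s) :: rest

def pvSegBal (seg : List Char) : Int := (seg.count '(' : Int) - (seg.count ')' : Int)

def rm_closed_newline_alt (joined_code : String) : String :=
  match pvSplitNL joined_code.toList with
  | [] => ""   -- unreachable: split never returns an empty list
  | s0 :: rest =>
    let res := rest.foldl (fun (st : Int × List (List Char)) seg =>
        let parts := if st.1 ≤ 0 then st.2 ++ [['\n']] else st.2
        (st.1 + pvSegBal seg, parts ++ [seg])) (pvSegBal s0, [s0])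
    String.mk res.2.flatten

-- ===== PRECONDITION & SPEC =====
def Spec_rm_closed_newline (joined_code : String) (out : String) : Prop := out = rm_closed_newline_alt joined_code
instance (joined_code : String) (out : String) : Decidable (Spec_rm_closed_newline joined_code out) := by unfold Spec_rm_closed_newline; infer_instance

-- ===== CLAIM (what is proved, stated in full; the proofs are below) =====
def Claim_equal_rm_closed_newline : Prop := ∀ (joined_code : String), Dom_rm_closed_newline joined_code → Spec_rm_closed_newline joined_code (rm_closed_newline joined_code)

-- ===== LEMMAS AND PROOFS =====

-- depth change contributed by one character
def pvDlt (c : Char) : Int := if c = '(' then 1 else if c = ')' then -1 else 0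

-- A's output, as a clean recursion (one piece per input character)
def pvOutA (d : Int) : List Char → List (List Char)
  | [] => []
  | c :: t => (if c = '\n' ∧ d > 0 then [] else [c]) :: pvOutA (d + pvDlt c) t

def pvBal : List Char → Int
  | [] => 0
  | c :: t => pvDlt c + pvBal t

-- '\n' preceding each tail segment when re-joining a split
def pvJoinTail (segs : List (List Char)) : List Char := segs.flatMap (fun s => '\n' :: s)

theorem pvBal_eq_segBal (cs : List Char) : pvBal cs = pvSegBal cs := by
  induction cs with
  | nil => simp [pvBal, pvSegBal]
  | cons c t ih =>
    simp only [pvBal, pvSegBal, List.count_cons, ih, pvDlt]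
    split_ifs with h1 h2 <;> subst_eqs <;> simp_all [pvSegBal] <;> ring

theorem pvFoldA (cs : List Char) : ∀ (d : Int) (acc : List (List Char)),
    cs.foldl (fun (st : Int × List (List Char)) c =>
      let s : List Char := if c = '\n' ∧ st.1 > 0 then [] else [c]
      let ret_ls := st.2 ++ [s]
      let d1 := if s = ['('] then st.1 + 1 else st.1
      let d2 := if s = [')'] then d1 - 1 else d1
      (d2, ret_ls)) (d, acc) = (d + pvBal cs, acc ++ pvOutA d cs) := by
  induction cs with
  | nil => intro d acc; simp [pvBal, pvOutA]
  | cons c t ih =>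
    intro d acc
    simp only [List.foldl_cons, pvBal, pvOutA, ih]
    have hstep : (if (if c = '\n' ∧ d > 0 then ([] : List Char) else [c]) = [')'] then
        (if (if c = '\n' ∧ d > 0 then ([] : List Char) else [c]) = ['('] then d + 1 else d) - 1
        else (if (if c = '\n' ∧ d > 0 then ([] : List Char) else [c]) = ['('] then d + 1 else d))
        = d + pvDlt c := by
      unfold pvDlt; split_ifs <;> simp_all <;> omega
    rw [hstep]
    simp [add_assoc]

theorem pvOutA_append (xs ys : List Char) : ∀ d,
    pvOutA d (xs ++ ys) = pvOutA d xs ++ pvOutA (d + pvBal xs) ys := by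
  induction xs with
  | nil => intro d; simp [pvOutA, pvBal]
  | cons c t ih =>
    intro d
    simp only [List.cons_append, pvOutA, ih, pvBal]
    rw [add_assoc]

theorem pvOutA_nlfree (seg : List Char) (h : '\n' ∉ seg) : ∀ d,
    (pvOutA d seg).flatten = seg := by
  induction seg with
  | nil => intro d; simp [pvOutA]
  | cons c t ih =>
    intro d
    simp only [List.mem_cons, not_or] at h
    simp only [pvOutA, List.flatten_cons, ih h.2]
    rw [if_neg (fun hc => h.1 hc.1.symm)]
    simp

theorem pvFoldB (rest : List (List Char)) : ∀ (d : Int) (acc : List (List Char)),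
    (∀ seg ∈ rest, '\n' ∉ seg) →
    ((rest.foldl (fun (st : Int × List (List Char)) seg =>
        let parts := if st.1 ≤ 0 then st.2 ++ [['\n']] else st.2
        (st.1 + pvSegBal seg, parts ++ [seg])) (d, acc)).2).flatten
      = acc.flatten ++ (pvOutA d (pvJoinTail rest)).flatten := by
  induction rest with
  | nil => intro d acc _; simp [pvJoinTail, pvOutA]
  | cons seg rest' ih =>
    intro d acc hfree
    have hseg : '\n' ∉ seg := hfree seg (by simp)
    have hrest : ∀ s ∈ rest', '\n' ∉ s := fun s hs => hfree s (by simp [hs])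
    simp only [List.foldl_cons]
    rw [ih (d + pvSegBal seg) _ hrest]
    rw [show pvJoinTail (seg :: rest') = ('\n' :: seg) ++ pvJoinTail rest' from by simp [pvJoinTail]]
    rw [pvOutA_append]
    rw [show pvBal ('\n' :: seg) = pvSegBal seg from by
      simp [pvBal, pvDlt, pvBal_eq_segBal]]
    have h0 : pvDlt '\n' = 0 := by decide
    simp only [pvOutA, h0, add_zero, List.flatten_append, List.flatten_cons,
      pvOutA_nlfree seg hseg]
    by_cases hd : d ≤ 0
    · simp [hd, show ¬ d > 0 from by omega]
    · simp [hd, show d > 0 from by omega]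

theorem pvSplitNL_spec (cs : List Char) :
    ∃ s0 rest, pvSplitNL cs = s0 :: rest ∧ s0 ++ pvJoinTail rest = cs ∧
      '\n' ∉ s0 ∧ ∀ seg ∈ rest, '\n' ∉ seg := by
  induction cs with
  | nil => exact ⟨[], [], rfl, by simp [pvJoinTail], by simp, by simp⟩
  | cons c t ih =>
    obtain ⟨s0, rest, heq, hjoin, hfree0, hfree⟩ := ih
    by_cases hc : c = '\n'
    · refine ⟨[], s0 :: rest, ?_, ?_, by simp, ?_⟩
      · simp [pvSplitNL, heq, hc]
      · subst hc; simp [pvJoinTail, ← hjoin]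
      · intro seg hseg
        rcases List.mem_cons.1 hseg with h | h
        · exact h ▸ hfree0
        · exact hfree seg h
    · refine ⟨c :: s0, rest, ?_, by simp [hjoin], ?_, hfree⟩
      · simp [pvSplitNL, heq, hc]
      · simp only [List.mem_cons, not_or]
        exact ⟨fun h => hc h.symm, hfree0⟩

-- ===== VERDICT (by name: the statement is the Claim_ definition above) =====
theorem rm_closed_newline_spec : Claim_equal_rm_closed_newline := by
  intro jc _
  unfold Spec_rm_closed_newline rm_closed_newline rm_closed_newline_alt
  obtain ⟨s0, rest, heq, hjoin, hfree0, hfree⟩ := pvSplitNL_spec jc.toList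
  rw [heq]
  simp only
  rw [pvFoldA]
  rw [pvFoldB rest (pvSegBal s0) [s0] hfree]
  simp only [List.flatten_cons, List.flatten_nil, List.append_nil, List.nil_append]
  rw [← hjoin, pvOutA_append, ← pvBal_eq_segBal]
  simp [pvOutA_nlfree s0 hfree0]
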